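-- pv_equiv track=rewrite | github.com/oscardobsonbrown/s2-tracker | apps/app/scripts/search_flights.py | normalize_airlines
-- ===== SOURCE A (Python) =====
-- def normalize_airlines(name: str) -> list[str]:
--     normalized_name = " ".join(name.split())
--
--     if not normalized_name:
--         return []
--
--     separators = [" operated by ", " Operated by ", " + ", " / ", " and "]
--     airline_names = [normalized_name]
--
--     for separator in separators:
--         airline_names = [
--             part.strip()
--             for airline_name in airline_names
--             for part in airline_name.split(separator)
--             if part.strip()
--         ]
--
--     return list(dict.fromkeys(airline_names))
-- ===== SOURCE B (Python) =====
-- def normalize_airlines(name: str) -> list[str]: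
--     normalized = " ".join(name.split())
--     if not normalized:
--         return []
--
--     def explode(s, seps):
--         if not seps:
--             return [s]
--         result = []
--         for part in s.split(seps[0]):
--             p = part.strip()
--             if p:
--                 result.extend(explode(p, seps[1:]))
--         return result
--
--     out = []
--     seen = set()
--     for p in explode(normalized, [" operated by ", " Operated by ", " + ", " / ", " and "]):
--         if p not in seen:
--             seen.add(p)
--             out.append(p)
--     return out
-- ===== Notes on version B (the rewrite author's own statement) =====
-- stated objective: alternative
-- what changed: A's five sequential whole-list splitting passes (rebuilding the list of parts once per separator) become a single depth-first recursion over the separator list that explodes each part completely before moving on, and the dict.fromkeys dedup becomes an explicit seen-set loop.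
import Mathlib
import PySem

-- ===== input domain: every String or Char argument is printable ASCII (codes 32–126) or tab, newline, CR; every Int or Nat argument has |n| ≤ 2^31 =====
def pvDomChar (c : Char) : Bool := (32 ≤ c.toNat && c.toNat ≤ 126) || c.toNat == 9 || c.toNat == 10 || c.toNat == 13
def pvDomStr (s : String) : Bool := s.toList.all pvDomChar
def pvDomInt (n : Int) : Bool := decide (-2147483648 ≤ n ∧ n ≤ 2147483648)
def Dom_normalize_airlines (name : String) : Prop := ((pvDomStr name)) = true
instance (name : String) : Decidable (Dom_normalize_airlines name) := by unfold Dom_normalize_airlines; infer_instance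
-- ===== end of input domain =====

-- B replaces A's five sequential rebuild-the-whole-list splitting passes by a single recursion
-- over the separator list (depth-first explode) and replaces dict.fromkeys by an explicit
-- seen-set loop; objective: alternative structure, same exact output.


-- s.split(sep) for a NONEMPTY sep (all separators here are nonempty literals, so
-- PySem.Str.split? always returns some; exact on that domain)
def pySplit (s : String) (sep : String) : List String :=
  (PySem.Str.split? s sep).getD []

-- ===== PORT A =====
def normalize_airlines (name : String) : List String :=
  let normalized_name := PySem.Str.join " " (PySem.Str.split₀ name)
  if normalized_name = "" then []
  else
    let separators := [" operated by ", " Operated by ", " + ", " / ", " and "]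
    let airline_names := [normalized_name]
    let airline_names :=
      separators.foldl
        (fun airline_names separator =>
          airline_names.flatMap (fun airline_name =>
            ((pySplit airline_name separator).map PySem.Str.strip).filter
              (fun part => part != "")))
        airline_names
    PySem.List.dedup airline_names

-- ===== PORT B =====
def pvExplode (s : String) (seps : List String) : List String :=
  match seps with
  | [] => [s]
  | sep :: rest =>
      (pySplit s sep).flatMap (fun part =>
        let p := PySem.Str.strip part
        if p = "" then [] else pvExplode p rest)

def normalize_airlines_alt (name : String) : List String :=
  let normalized := PySem.Str.join " " (PySem.Str.split₀ name)
  if normalized = "" then []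
  else
    (((pvExplode normalized [" operated by ", " Operated by ", " + ", " / ", " and "]).foldl
        (fun (acc : List String × PySem.Set String) p =>
          if PySem.Set.contains acc.2 p then acc else (acc.1 ++ [p], PySem.Set.add acc.2 p))
        ([], PySem.Set.empty)).1)

-- ===== PRECONDITION & SPEC =====
def Spec_normalize_airlines (name : String) (out : List String) : Prop := out = normalize_airlines_alt name
instance (name : String) (out : List String) : Decidable (Spec_normalize_airlines name out) := by unfold Spec_normalize_airlines; infer_instance

-- ===== CLAIM (what is proved, stated in full; the proofs are below) =====
def Claim_equal_normalize_airlines : Prop := ∀ (name : String), Dom_normalize_airlines name → Spec_normalize_airlines name (normalize_airlines name)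

-- ===== LEMMAS AND PROOFS =====

-- a flatMap over A's strip-and-filter comprehension is B's strip-then-branch flatMap
theorem pv_filter_strip_flatMap (l : List String) (f : String → List String) :
    (((l.map PySem.Str.strip).filter (fun part => part != "")).flatMap f)
      = l.flatMap (fun part =>
          let p := PySem.Str.strip part
          if p = "" then [] else f p) := by
  induction l with
  | nil => rfl
  | cons x xs ih =>
    simp only [List.map_cons, List.filter_cons, List.flatMap_cons]
    by_cases h : PySem.Str.strip x = "" <;> simp [h, ih]

-- A's foldl of passes over any part list equals flatMapping B's explode over it
theorem pvExplode_foldl (seps : List String) (xs : List String) :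
    seps.foldl
        (fun airline_names separator =>
          airline_names.flatMap (fun airline_name =>
            ((pySplit airline_name separator).map PySem.Str.strip).filter
              (fun part => part != "")))
        xs
      = xs.flatMap (fun s => pvExplode s seps) := by
  induction seps generalizing xs with
  | nil => simp [pvExplode]
  | cons sep rest ih =>
    simp only [List.foldl_cons, ih, List.flatMap_assoc]
    refine List.flatMap_congr (fun s _ => ?_)
    rw [pv_filter_strip_flatMap]
    rfl

-- B's seen-set loop: both accumulator components stay the same Set
theorem pvSeenLoop (l : List String) (s : PySem.Set String) :
    l.foldl
        (fun (acc : List String × PySem.Set String) p =>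
          if PySem.Set.contains acc.2 p then acc else (acc.1 ++ [p], PySem.Set.add acc.2 p))
        (s, s)
      = (PySem.Set.update s l, PySem.Set.update s l) := by
  induction l generalizing s with
  | nil => rfl
  | cons x xs ih =>
    simp only [List.foldl_cons, PySem.Set.update_cons]
    by_cases h : PySem.Set.contains s x
    · have hadd : PySem.Set.add s x = s :=
        PySem.Set.add_of_mem ((PySem.Set.contains_iff _ _).mp h)
      rw [if_pos h, ih, hadd]
    · have hadd : PySem.Set.add s x = s ++ [x] :=
        PySem.Set.add_of_not_mem (fun hm => h ((PySem.Set.contains_iff _ _).mpr hm))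
      rw [if_neg h, hadd]
      exact ih _

-- ===== VERDICT (by name: the statement is the Claim_ definition above) =====
theorem normalize_airlines_spec : Claim_equal_normalize_airlines := by
  intro name _
  unfold Spec_normalize_airlines normalize_airlines normalize_airlines_alt
  by_cases h : PySem.Str.join " " (PySem.Str.split₀ name) = ""
  · simp [h]
  · simp only [h, ite_false]
    rw [pvExplode_foldl]
    rw [show (([], PySem.Set.empty) : List String × PySem.Set String)
          = (PySem.Set.empty, PySem.Set.empty) from rfl,
        pvSeenLoop]
    simp [PySem.Set.update_nil_left]
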